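-- pv_equiv track=rewrite | github.com/honeyhyuni/algorithm | programmers_level2/169199_programmers.py | solution
-- ===== SOURCE A (Python) =====
-- from collections import deque
--
-- def solution(board):
--     n, m = len(board), len(board[0])
--     dx, dy = [-1, 1, 0, 0], [0, 0, -1, 1]
--     q = deque()
--     visited = [[-1] * m for i in range(n)]
--     for i in range(n):
--         for j in range(m):
--             if board[i][j] == "R":
--                 q.append((i, j, 0))
--                 visited[i][j] = 0
--
--     while q:
--         x, y, c = q.popleft()
--         if board[x][y] == 'G':
--             return c
--         for _ in range(4):
--             for __ in range(1, max(n, m)+1):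
--                 nx = x + dx[_] * __
--                 ny = y + dy[_] * __
--                 if not (0 <= nx < n and 0 <= ny < m) or board[nx][ny] == 'D':
--                     xx = nx-dx[_]
--                     yy = ny-dy[_]
--                     if visited[xx][yy] == -1:
--                         visited[xx][yy] = c + 1
--                         q.append((xx, yy, c + 1))
--                     break
--     return -1
-- ===== SOURCE B (Python) =====
-- from collections import deque
--
-- def stops_low(line):
--     # stop index when sliding toward index 0; line[k] is True iff cell k is a blocker
--     res = []
--     for k in range(len(line)):
--         res.append(k if k == 0 or line[k - 1] else res[k - 1])
--     return res
--
-- def stops_high(line):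
--     # stop index when sliding toward index len(line)-1
--     L = len(line)
--     res = [0] * L
--     for k in range(L - 1, -1, -1):
--         res[k] = k if k == L - 1 or line[k + 1] else res[k + 1]
--     return res
--
-- def solution(board):
--     n, m = len(board), len(board[0])
--     rows = [[row[j] == 'D' for j in range(m)] for row in board]
--     cols = [[row[j] for row in rows] for j in range(m)]
--     left = [stops_low(r) for r in rows]
--     right = [stops_high(r) for r in rows]
--     up = [stops_low(c) for c in cols]
--     down = [stops_high(c) for c in cols]
--     q = deque()
--     visited = [[-1] * m for i in range(n)]
--     for i in range(n):
--         for j in range(m):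
--             if board[i][j] == "R":
--                 q.append((i, j, 0))
--                 visited[i][j] = 0
--     while q:
--         x, y, c = q.popleft()
--         if board[x][y] == 'G':
--             return c
--         for nx, ny in ((up[y][x], y), (down[y][x], y), (x, left[x][y]), (x, right[x][y])):
--             if visited[nx][ny] == -1:
--                 visited[nx][ny] = c + 1
--                 q.append((nx, ny, c + 1))
--     return -1
-- ===== Notes on version B (the rewrite author's own statement) =====
-- stated objective: alternative
-- what changed: A finds where the ball stops by re-scanning the board cell by cell from every popped BFS node in each of the four directions; B instead precomputes, with four row/column sweeps (stops_low/stops_high), a table of the stop cell of every cell in every direction, and the BFS step just looks the four successors up.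
import Mathlib
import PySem

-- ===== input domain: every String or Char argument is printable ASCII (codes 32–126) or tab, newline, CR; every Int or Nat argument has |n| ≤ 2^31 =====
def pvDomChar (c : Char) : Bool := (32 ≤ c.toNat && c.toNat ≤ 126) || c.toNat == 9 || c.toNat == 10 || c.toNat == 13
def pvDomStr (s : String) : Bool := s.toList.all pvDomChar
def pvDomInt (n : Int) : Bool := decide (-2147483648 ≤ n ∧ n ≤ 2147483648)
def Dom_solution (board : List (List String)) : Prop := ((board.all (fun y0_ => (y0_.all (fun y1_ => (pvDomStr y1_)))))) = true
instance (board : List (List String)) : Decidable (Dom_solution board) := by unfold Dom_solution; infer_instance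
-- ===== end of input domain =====

-- B replaces A's per-pop directional slide scans by stop tables precomputed with four
-- row/column sweeps; the BFS then looks its four successors up (alternative algorithm).

-- ===== PORT A =====
-- shared trivial accessors (board cell, visited read/write); all uses are at
-- non-negative in-range indices, so `getD`/`toNat` are exact for the Python indexing
def gcell (b : List (List String)) (i j : Int) : String :=
  (b.getD i.toNat []).getD j.toNat ""

def vget (v : List (List Int)) (i j : Int) : Int :=
  (v.getD i.toNat []).getD j.toNat 0

def vset (v : List (List Int)) (i j a : Int) : List (List Int) :=
  v.set i.toNat ((v.getD i.toNat []).set j.toNat a)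

-- the R-seeding double loop (identical source text in A and in B)
def seed (b : List (List String)) (n m : Int) :
    List (Int × Int × Int) × List (List Int) :=
  (PySem.List.pyRange 0 n 1).foldl (fun st i =>
    (PySem.List.pyRange 0 m 1).foldl (fun st j =>
      if gcell b i j = "R" then (st.1 ++ [(i, j, (0 : Int))], vset st.2 i j 0) else st) st)
    ([], List.replicate n.toNat (List.replicate m.toNat (-1)))

-- A's inner `for __ in range(1, max(n,m)+1)` slide scan with its break
def scanA (b : List (List String)) (n m x y c dx dy : Int)
    (st : List (List Int) × List (Int × Int × Int)) :
    List Int → List (List Int) × List (Int × Int × Int)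
  | [] => st
  | s :: rest =>
      let nx := x + dx * s
      let ny := y + dy * s
      if ¬(0 ≤ nx ∧ nx < n ∧ 0 ≤ ny ∧ ny < m) ∨ gcell b nx ny = "D" then
        let xx := nx - dx
        let yy := ny - dy
        if vget st.1 xx yy = -1 then (vset st.1 xx yy (c + 1), st.2 ++ [(xx, yy, c + 1)])
        else st
      else scanA b n m x y c dx dy st rest

-- `for _ in range(4)` over (dx[_], dy[_])
def stepA (b : List (List String)) (n m x y c : Int)
    (st : List (List Int) × List (Int × Int × Int)) :
    List (List Int) × List (Int × Int × Int) :=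
  ([((-1 : Int), (0 : Int)), (1, 0), (0, -1), (0, 1)]).foldl
    (fun st d => scanA b n m x y c d.1 d.2 st (PySem.List.pyRange 1 (max n m + 1) 1)) st

def loopA (b : List (List String)) (n m : Int) :
    Nat → List (Int × Int × Int) → List (List Int) → Int
  | 0, _, _ => -1
  | _ + 1, [], _ => -1
  | fuel + 1, (x, y, c) :: qr, v =>
      if gcell b x y = "G" then c
      else
        let st := stepA b n m x y c (v, qr)
        loopA b n m fuel st.2 st.1

def solution (board : List (List String)) : Int :=
  let n : Int := board.length
  let m : Int := (board.headD []).length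
  let st := seed board n m
  loopA board n m (board.length * (board.headD []).length + 1) st.1 st.2

-- ===== PORT B =====
-- stop index when sliding toward index 0 (one left-to-right sweep)
def stopsLowAux (k prev : Int) (pb : Bool) : List Bool → List Int
  | [] => []
  | bl :: rest =>
      let s := if k = 0 ∨ pb = true then k else prev
      s :: stopsLowAux (k + 1) s bl rest

def stopsLow (line : List Bool) : List Int := stopsLowAux 0 0 true line

-- stop index when sliding toward the last index (one right-to-left sweep)
def stopsHighAux (k : Int) : List Bool → List Int
  | [] => []
  | _ :: rest =>
      let tail := stopsHighAux (k + 1) rest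
      (match rest with
       | [] => k
       | b' :: _ => if b' = true then k else tail.headD k) :: tail

def stopsHigh (line : List Bool) : List Int := stopsHighAux 0 line

def rowsB (board : List (List String)) (m : Int) : List (List Bool) :=
  board.map (fun row => (PySem.List.pyRange 0 m 1).map (fun j => row.getD j.toNat "" == "D"))

def colsB (rows : List (List Bool)) (m : Int) : List (List Bool) :=
  (PySem.List.pyRange 0 m 1).map (fun j => rows.map (fun row => row.getD j.toNat false))

-- B's O(1) neighbour step: the four precomputed stop cells
def stepB (x y c upv dnv lfv rtv : Int)
    (st : List (List Int) × List (Int × Int × Int)) :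
    List (List Int) × List (Int × Int × Int) :=
  ([(upv, y), (dnv, y), (x, lfv), (x, rtv)]).foldl
    (fun st p =>
      if vget st.1 p.1 p.2 = -1 then (vset st.1 p.1 p.2 (c + 1), st.2 ++ [(p.1, p.2, c + 1)])
      else st) st

def loopB (b : List (List String)) (up dn lf rt : List (List Int)) :
    Nat → List (Int × Int × Int) → List (List Int) → Int
  | 0, _, _ => -1
  | _ + 1, [], _ => -1
  | fuel + 1, (x, y, c) :: qr, v =>
      if gcell b x y = "G" then c
      else
        let st := stepB x y c (vget up y x) (vget dn y x) (vget lf x y) (vget rt x y) (v, qr)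
        loopB b up dn lf rt fuel st.2 st.1

def solution_alt (board : List (List String)) : Int :=
  let n : Int := board.length
  let m : Int := (board.headD []).length
  let rows := rowsB board m
  let cols := colsB rows m
  let lf := rows.map stopsLow
  let rt := rows.map stopsHigh
  let up := cols.map stopsLow
  let dn := cols.map stopsHigh
  let st := seed board n m
  loopB board up dn lf rt (board.length * (board.headD []).length + 1) st.1 st.2

-- ===== PRECONDITION & SPEC =====
-- Pre_ excludes exactly the boards on which A raises IndexError: the empty board
-- (board[0]) and boards with some row shorter than the first row (board[i][j], j < m).
def Pre_solution (board : List (List String)) : Prop :=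
  board ≠ [] ∧ ∀ row ∈ board, (board.headD []).length ≤ row.length
instance (board : List (List String)) : Decidable (Pre_solution board) := by
  unfold Pre_solution; infer_instance

def pvWitness_solution : List (List String) := [["R", "."], [".", "G"]]

def Spec_solution (board : List (List String)) (out : Int) : Prop := out = solution_alt board
instance (board : List (List String)) (out : Int) : Decidable (Spec_solution board out) := by
  unfold Spec_solution; infer_instance

-- ===== CLAIM (what is proved, stated in full; the proofs are below) =====
def Claim_equal_solution : Prop := ∀ (board : List (List String)), Dom_solution board → Pre_solution board → Spec_solution board (solution board)

-- ===== LEMMAS AND PROOFS =====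

def upd (c : Int) (st : List (List Int) × List (Int × Int × Int)) (i j : Int) :
    List (List Int) × List (Int × Int × Int) :=
  if vget st.1 i j = -1 then (vset st.1 i j (c + 1), st.2 ++ [(i, j, c + 1)]) else st

lemma stepB_eq_upd (x y c u d l r : Int) (st : List (List Int) × List (Int × Int × Int)) :
    stepB x y c u d l r st =
      upd c (upd c (upd c (upd c st u y) d y) x l) x r := rfl

lemma scanA_cons (b : List (List String)) (n m x y c dx dy s : Int)
    (st : List (List Int) × List (Int × Int × Int)) (rest : List Int) :
    scanA b n m x y c dx dy st (s :: rest) =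
      if ¬(0 ≤ x + dx * s ∧ x + dx * s < n ∧ 0 ≤ y + dy * s ∧ y + dy * s < m) ∨
          gcell b (x + dx * s) (y + dy * s) = "D" then
        upd c st (x + dx * s - dx) (y + dy * s - dy)
      else scanA b n m x y c dx dy st rest := rfl

-- A's scan reaches the first blocked step s and updates at the cell before it
lemma scan_reach (b : List (List String)) (n m x y c dx dy K s : Int)
    (hK : s < K)
    (hblock : ¬(0 ≤ x + dx * s ∧ x + dx * s < n ∧ 0 ≤ y + dy * s ∧ y + dy * s < m) ∨
        gcell b (x + dx * s) (y + dy * s) = "D") :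
    ∀ (N : Nat) (a : Int), (s - a).toNat ≤ N → a ≤ s →
    (∀ t, a ≤ t → t < s →
      (0 ≤ x + dx * t ∧ x + dx * t < n ∧ 0 ≤ y + dy * t ∧ y + dy * t < m) ∧
        gcell b (x + dx * t) (y + dy * t) ≠ "D") →
    ∀ st, scanA b n m x y c dx dy st (PySem.List.pyRange a K 1) =
      upd c st (x + dx * s - dx) (y + dy * s - dy) := by
  intro N
  induction N with
  | zero =>
      intro a hle ha hmin st
      have : a = s := by omega
      subst this
      rw [PySem.List.pyRange_one_cons (by omega), scanA_cons, if_pos hblock]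
  | succ N ih =>
      intro a hle ha hmin st
      by_cases has : a = s
      · subst has
        rw [PySem.List.pyRange_one_cons (by omega), scanA_cons, if_pos hblock]
      · have halt : a < s := lt_of_le_of_ne ha has
        rw [PySem.List.pyRange_one_cons (by omega), scanA_cons, if_neg]
        · exact ih (a + 1) (by omega) (by omega) (fun t h1 h2 => hmin t (by omega) h2) st
        · obtain ⟨hin, hd⟩ := hmin a le_rfl halt
          push Not
          exact ⟨hin, hd⟩

lemma stopsLowAux_zero (k prev : Int) (pb : Bool) (bl : Bool) (rest : List Bool) :
    (stopsLowAux k prev pb (bl :: rest)).getD 0 0 = if k = 0 ∨ pb = true then k else prev := by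
  simp only [stopsLowAux, List.getD_cons_zero]

lemma stopsLowAux_succ : ∀ (rest : List Bool) (k prev : Int) (pb : Bool) (x : Nat),
    0 ≤ k → x + 1 < rest.length →
    (stopsLowAux k prev pb rest).getD (x + 1) 0 =
      if rest.getD x false = true then k + x + 1 else (stopsLowAux k prev pb rest).getD x 0 := by
  intro rest
  induction rest with
  | nil => intro k prev pb x hk hlen; simp at hlen
  | cons bl rest' ih =>
      intro k prev pb x hk hlen
      simp only [stopsLowAux, List.getD_cons_succ]
      cases x with
      | zero =>
          cases rest' with
          | nil => simp at hlen
          | cons b2 r2 =>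
              rw [stopsLowAux_zero]
              have : ¬ (k + 1 = 0) := by omega
              simp only [List.getD_cons_zero, this, false_or]
              cases bl <;> simp
      | succ x' =>
          have hlen' : x' + 1 < rest'.length := by simp at hlen; omega
          rw [ih (k + 1) _ bl x' (by omega) hlen']
          simp only [List.getD_cons_succ]
          have : k + 1 + ↑x' + 1 = k + ↑(x' + 1) + 1 := by push_cast; ring
          rw [this]

lemma low_spec (line : List Bool) : ∀ (x : Nat), x < line.length →
    0 ≤ (stopsLow line).getD x 0 ∧ (stopsLow line).getD x 0 ≤ (x : Int) ∧
    ((stopsLow line).getD x 0 = 0 ∨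
      line.getD ((stopsLow line).getD x 0 - 1).toNat false = true) ∧
    ∀ j : Nat, (stopsLow line).getD x 0 ≤ (j : Int) → j < x → line.getD j false = false := by
  intro x
  induction x with
  | zero =>
      intro hx
      cases line with
      | nil => simp at hx
      | cons bl rest =>
          rw [stopsLow, stopsLowAux_zero]
          simp
  | succ x ih =>
      intro hx
      have hrec := stopsLowAux_succ line 0 0 true x le_rfl hx
      rw [stopsLow] at *
      by_cases hb : line.getD x false = true
      · rw [hrec, if_pos hb]
        refine ⟨by omega, by omega, Or.inr ?_, ?_⟩
        · have : (0 + (x : Int) + 1 - 1).toNat = x := by omega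
          rw [this]; exact hb
        · intro j h1 h2; omega
      · rw [hrec, if_neg hb]
        obtain ⟨h1, h2, h3, h4⟩ := ih (by omega)
        refine ⟨h1, by omega, h3, ?_⟩
        intro j hj1 hj2
        rcases Nat.lt_succ_iff_lt_or_eq.mp hj2 with h | h
        · exact h4 j hj1 h
        · subst h; simpa using hb

lemma stopsHighAux_length : ∀ (line : List Bool) (k : Int),
    (stopsHighAux k line).length = line.length := by
  intro line
  induction line with
  | nil => intro k; rfl
  | cons bl rest ih => intro k; simp only [stopsHighAux, List.length_cons, ih]

lemma stopsHighAux_last : ∀ (line : List Bool) (k : Int), line ≠ [] →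
    (stopsHighAux k line).getD (line.length - 1) 0 = k + line.length - 1 := by
  intro line
  induction line with
  | nil => intro k h; simp at h
  | cons bl rest ih =>
      intro k _
      cases rest with
      | nil => simp [stopsHighAux]
      | cons b2 r2 =>
          have hlen : (b2 :: r2).length - 1 + 1 = (bl :: b2 :: r2).length - 1 := by simp
          simp only [stopsHighAux]
          rw [← hlen, List.getD_cons_succ]
          have := ih (k + 1) (by simp)
          simp only [stopsHighAux] at this ⊢
          rw [this]
          simp; ring

lemma stopsHighAux_cons (k : Int) (bl : Bool) (rest : List Bool) :
    stopsHighAux k (bl :: rest) =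
      (match rest with
       | [] => k
       | b' :: _ => if b' = true then k else (stopsHighAux (k + 1) rest).headD k) ::
        stopsHighAux (k + 1) rest := rfl

lemma stopsHighAux_succ : ∀ (line : List Bool) (k : Int) (x : Nat), x + 1 < line.length →
    (stopsHighAux k line).getD x 0 =
      if line.getD (x + 1) false = true then k + x
      else (stopsHighAux k line).getD (x + 1) 0 := by
  intro line
  induction line with
  | nil => intro k x h; simp at h
  | cons bl rest ih =>
      intro k x hlen
      cases rest with
      | nil => simp at hlen
      | cons b2 r2 =>
          cases x with
          | zero =>
              rw [stopsHighAux_cons]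
              simp only [List.getD_cons_zero, List.getD_cons_succ, Nat.cast_zero, add_zero]
              cases hb : b2
              · simp only [Bool.false_eq_true, if_false]
                cases htail : stopsHighAux (k + 1) (false :: r2) with
                | nil =>
                    have := stopsHighAux_length (false :: r2) (k + 1)
                    rw [htail] at this; simp at this
                | cons t ts => rfl
              · simp
          | succ x' =>
              have hlen2 : x' + 1 < (b2 :: r2).length := by simp at hlen ⊢; omega
              rw [stopsHighAux_cons]
              simp only [List.getD_cons_succ]
              rw [ih (k + 1) x' hlen2]
              have : k + 1 + (x' : Int) = k + ↑(x' + 1) := by push_cast; ring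
              rw [this, List.getD_cons_succ]

lemma high_spec (line : List Bool) : ∀ (x : Nat), x < line.length →
    (x : Int) ≤ (stopsHigh line).getD x 0 ∧ (stopsHigh line).getD x 0 < (line.length : Int) ∧
    ((stopsHigh line).getD x 0 = (line.length : Int) - 1 ∨
      line.getD ((stopsHigh line).getD x 0 + 1).toNat false = true) ∧
    ∀ j : Nat, (x : Int) < j → (j : Int) ≤ (stopsHigh line).getD x 0 → line.getD j false = false := by
  have hsh : stopsHigh line = stopsHighAux 0 line := rfl
  have hlast : ∀ x : Nat, x < line.length → x = line.length - 1 →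
      (x : Int) ≤ (stopsHigh line).getD x 0 ∧ (stopsHigh line).getD x 0 < (line.length : Int) ∧
      ((stopsHigh line).getD x 0 = (line.length : Int) - 1 ∨
        line.getD ((stopsHigh line).getD x 0 + 1).toNat false = true) ∧
      ∀ j : Nat, (x : Int) < j → (j : Int) ≤ (stopsHigh line).getD x 0 → line.getD j false = false := by
    intro x hx heq
    have hne : line ≠ [] := by intro h; rw [h] at hx; simp at hx
    have hval := stopsHighAux_last line 0 hne
    rw [hsh, heq, hval]
    refine ⟨by omega, by omega, Or.inl (by omega), ?_⟩
    intro j h1 h2; omega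
  suffices H : ∀ (d x : Nat), line.length - 1 - x ≤ d → x < line.length →
      (x : Int) ≤ (stopsHigh line).getD x 0 ∧ (stopsHigh line).getD x 0 < (line.length : Int) ∧
      ((stopsHigh line).getD x 0 = (line.length : Int) - 1 ∨
        line.getD ((stopsHigh line).getD x 0 + 1).toNat false = true) ∧
      ∀ j : Nat, (x : Int) < j → (j : Int) ≤ (stopsHigh line).getD x 0 → line.getD j false = false by
    intro x hx; exact H line.length x (by omega) hx
  intro d
  induction d with
  | zero => intro x hd hx; exact hlast x hx (by omega)
  | succ d ih =>
      intro x hd hx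
      by_cases hend : x + 1 < line.length
      · have hrec := stopsHighAux_succ line 0 x hend
        by_cases hb : line.getD (x + 1) false = true
        · rw [hsh, hrec, if_pos hb]
          refine ⟨by omega, by omega, Or.inr ?_, ?_⟩
          · have : ((0 : Int) + ↑x + 1).toNat = x + 1 := by omega
            rw [this]; exact hb
          · intro j h1 h2; omega
        · rw [hsh, hrec, if_neg hb]
          obtain ⟨h1, h2, h3, h4⟩ := ih (x + 1) (by omega) hend
          rw [hsh] at h1 h2 h3 h4
          refine ⟨by push_cast at h1 ⊢; omega, h2, h3, ?_⟩
          intro j hj1 hj2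
          by_cases hjx : j = x + 1
          · subst hjx; simpa using hb
          · exact h4 j (by push_cast at hj1 ⊢; omega) hj2
      · exact hlast x hx (by omega)

lemma rowsB_getD (board : List (List String)) (L0 x : Nat) (hx : x < board.length) :
    (rowsB board (L0 : Int)).getD x [] =
      (PySem.List.pyRange 0 (L0 : Int) 1).map (fun j => (board[x]).getD j.toNat "" == "D") := by
  unfold rowsB
  exact PySem.List.getD_map_of_lt _ _ _ _ hx

lemma rowLine_len (board : List (List String)) (L0 x : Nat) (hx : x < board.length) :
    ((rowsB board (L0 : Int)).getD x []).length = L0 := by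
  rw [rowsB_getD board L0 x hx]
  simp [PySem.List.length_pyRange_one]

lemma rowGet (board : List (List String)) (L0 x y : Nat) (hx : x < board.length) (hy : y < L0) :
    ((rowsB board (L0 : Int)).getD x []).getD y false =
      (gcell board (x : Int) (y : Int) == "D") := by
  rw [rowsB_getD board L0 x hx, ← PySem.List.pyGetD_natCast,
    PySem.List.pyGetD_map_pyRange _ L0 y false hy]
  unfold gcell
  rw [Int.toNat_natCast, Int.toNat_natCast, List.getD_eq_getElem board [] hx]

lemma colsB_getD (board : List (List String)) (L0 y : Nat) (hy : y < L0) :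
    (colsB (rowsB board (L0 : Int)) (L0 : Int)).getD y [] =
      (rowsB board (L0 : Int)).map (fun row => row.getD ((y : Int)).toNat false) := by
  unfold colsB
  rw [← PySem.List.pyGetD_natCast, PySem.List.pyGetD_map_pyRange _ L0 y [] hy]

lemma rowsB_len (board : List (List String)) (m : Int) :
    (rowsB board m).length = board.length := by simp [rowsB]

lemma colLine_len (board : List (List String)) (L0 y : Nat) (hy : y < L0) :
    ((colsB (rowsB board (L0 : Int)) (L0 : Int)).getD y []).length = board.length := by
  rw [colsB_getD board L0 y hy]
  simp [rowsB]

lemma colGet (board : List (List String)) (L0 x y : Nat) (hx : x < board.length) (hy : y < L0) :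
    ((colsB (rowsB board (L0 : Int)) (L0 : Int)).getD y []).getD x false =
      (gcell board (x : Int) (y : Int) == "D") := by
  rw [colsB_getD board L0 y hy,
    PySem.List.getD_map_of_lt _ _ _ _ (by rw [rowsB_len]; exact hx)]
  rw [← List.getD_eq_getElem (rowsB board (L0 : Int)) [] (by rw [rowsB_len]; exact hx)]
  rw [Int.toNat_natCast]
  exact rowGet board L0 x y hx hy

-- the four tables as solution_alt builds them
def upTab (board : List (List String)) (m : Int) : List (List Int) :=
  (colsB (rowsB board m) m).map stopsLow
def dnTab (board : List (List String)) (m : Int) : List (List Int) :=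
  (colsB (rowsB board m) m).map stopsHigh
def lfTab (board : List (List String)) (m : Int) : List (List Int) :=
  (rowsB board m).map stopsLow
def rtTab (board : List (List String)) (m : Int) : List (List Int) :=
  (rowsB board m).map stopsHigh

lemma colsB_len (board : List (List String)) (L0 : Nat) :
    (colsB (rowsB board (L0 : Int)) (L0 : Int)).length = L0 := by
  simp [colsB, PySem.List.length_pyRange_one]

lemma upTab_getD (board : List (List String)) (L0 x y : Nat) (hy : y < L0) :
    vget (upTab board (L0 : Int)) (y : Int) (x : Int) =
      (stopsLow ((colsB (rowsB board (L0 : Int)) (L0 : Int)).getD y [])).getD x 0 := by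
  unfold vget upTab
  rw [Int.toNat_natCast, Int.toNat_natCast,
    PySem.List.getD_map_of_lt _ _ _ _ (by rw [colsB_len]; exact hy),
    ← List.getD_eq_getElem _ [] (by rw [colsB_len]; exact hy)]

lemma dnTab_getD (board : List (List String)) (L0 x y : Nat) (hy : y < L0) :
    vget (dnTab board (L0 : Int)) (y : Int) (x : Int) =
      (stopsHigh ((colsB (rowsB board (L0 : Int)) (L0 : Int)).getD y [])).getD x 0 := by
  unfold vget dnTab
  rw [Int.toNat_natCast, Int.toNat_natCast,
    PySem.List.getD_map_of_lt _ _ _ _ (by rw [colsB_len]; exact hy),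
    ← List.getD_eq_getElem _ [] (by rw [colsB_len]; exact hy)]

lemma lfTab_getD (board : List (List String)) (L0 x y : Nat) (hx : x < board.length) :
    vget (lfTab board (L0 : Int)) (x : Int) (y : Int) =
      (stopsLow ((rowsB board (L0 : Int)).getD x [])).getD y 0 := by
  unfold vget lfTab
  rw [Int.toNat_natCast, Int.toNat_natCast,
    PySem.List.getD_map_of_lt _ _ _ _ (by rw [rowsB_len]; exact hx),
    ← List.getD_eq_getElem _ [] (by rw [rowsB_len]; exact hx)]

lemma rtTab_getD (board : List (List String)) (L0 x y : Nat) (hx : x < board.length) :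
    vget (rtTab board (L0 : Int)) (x : Int) (y : Int) =
      (stopsHigh ((rowsB board (L0 : Int)).getD x [])).getD y 0 := by
  unfold vget rtTab
  rw [Int.toNat_natCast, Int.toNat_natCast,
    PySem.List.getD_map_of_lt _ _ _ _ (by rw [rowsB_len]; exact hx),
    ← List.getD_eq_getElem _ [] (by rw [rowsB_len]; exact hx)]

lemma scan_up (board : List (List String)) (L0 : Nat) (x y c : Int)
    (hx0 : 0 ≤ x) (hxn : x < (board.length : Int)) (hy0 : 0 ≤ y) (hym : y < (L0 : Int))
    (st : List (List Int) × List (Int × Int × Int)) :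
    scanA board (board.length : Int) (L0 : Int) x y c (-1) 0 st
      (PySem.List.pyRange 1 (max (board.length : Int) (L0 : Int) + 1) 1) =
      upd c st (vget (upTab board (L0 : Int)) y x) y := by
  have hxx : ((x.toNat : Nat) : Int) = x := Int.toNat_of_nonneg hx0
  have hyy : ((y.toNat : Nat) : Int) = y := Int.toNat_of_nonneg hy0
  have hcl : ((colsB (rowsB board (L0 : Int)) (L0 : Int)).getD y.toNat []).length = board.length :=
    colLine_len board L0 y.toNat (by omega)
  obtain ⟨hs0, hsx, hsb, hsmin⟩ := low_spec _ x.toNat (by rw [hcl]; omega)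
  set col := (colsB (rowsB board (L0 : Int)) (L0 : Int)).getD y.toNat [] with hcol
  set σ := (stopsLow col).getD x.toNat 0 with hσ
  rw [hxx] at hsx
  have hval : vget (upTab board (L0 : Int)) y x = σ := by
    rw [← hxx, ← hyy]; exact upTab_getD board L0 x.toNat y.toNat (by omega)
  have hblock : ¬(0 ≤ x + (-1) * (x - σ + 1) ∧ x + (-1) * (x - σ + 1) < (board.length : Int) ∧
      0 ≤ y + 0 * (x - σ + 1) ∧ y + 0 * (x - σ + 1) < (L0 : Int)) ∨
      gcell board (x + (-1) * (x - σ + 1)) (y + 0 * (x - σ + 1)) = "D" := by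
    have harg1 : x + (-1) * (x - σ + 1) = σ - 1 := by ring
    have harg2 : y + 0 * (x - σ + 1) = y := by ring
    rw [harg1, harg2]
    by_cases hσ0 : σ = 0
    · exact Or.inl (by omega)
    · refine Or.inr ?_
      have hcg := colGet board L0 (σ - 1).toNat y.toNat (by omega) (by omega)
      rcases hsb with h | h
      · exact absurd h hσ0
      · rw [← hcol] at hcg
        rw [hcg] at h
        have : ((σ - 1).toNat : Int) = σ - 1 := by omega
        rw [this, hyy] at h
        exact eq_of_beq h
  have happ := scan_reach board (board.length : Int) (L0 : Int) x y c (-1) 0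
    (max (board.length : Int) (L0 : Int) + 1) (x - σ + 1) (by omega) hblock
    (x - σ).toNat 1 (by omega) (by omega) ?_ st
  · rw [happ]
    have h1 : x + -1 * (x - σ + 1) - -1 = σ := by ring
    have h2 : y + 0 * (x - σ + 1) - 0 = y := by ring
    rw [h1, h2, hval]
  · intro t ht1 ht2
    have harg1 : x + (-1) * t = x - t := by ring
    have harg2 : y + 0 * t = y := by ring
    rw [harg1, harg2]
    refine ⟨⟨by omega, by omega, by omega, by omega⟩, ?_⟩
    have hj : (((x - t).toNat : Nat) : Int) = x - t := by omega
    have hcg := colGet board L0 (x - t).toNat y.toNat (by omega) (by omega)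
    rw [← hcol] at hcg
    have hfalse := hsmin (x - t).toNat (by omega) (by omega)
    rw [hcg] at hfalse
    rw [← hj, ← hyy]
    intro hEq
    rw [hEq] at hfalse
    simp at hfalse

lemma scan_dn (board : List (List String)) (L0 : Nat) (x y c : Int)
    (hx0 : 0 ≤ x) (hxn : x < (board.length : Int)) (hy0 : 0 ≤ y) (hym : y < (L0 : Int))
    (st : List (List Int) × List (Int × Int × Int)) :
    scanA board (board.length : Int) (L0 : Int) x y c 1 0 st
      (PySem.List.pyRange 1 (max (board.length : Int) (L0 : Int) + 1) 1) =
      upd c st (vget (dnTab board (L0 : Int)) y x) y := by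
  have hxx : ((x.toNat : Nat) : Int) = x := Int.toNat_of_nonneg hx0
  have hyy : ((y.toNat : Nat) : Int) = y := Int.toNat_of_nonneg hy0
  have hcl : ((colsB (rowsB board (L0 : Int)) (L0 : Int)).getD y.toNat []).length = board.length :=
    colLine_len board L0 y.toNat (by omega)
  obtain ⟨hs1, hs2, hsb, hsmin⟩ := high_spec _ x.toNat (by rw [hcl]; omega)
  set col := (colsB (rowsB board (L0 : Int)) (L0 : Int)).getD y.toNat [] with hcol
  set η := (stopsHigh col).getD x.toNat 0 with hη
  rw [hxx] at hs1
  rw [hcl] at hs2 hsb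
  have hval : vget (dnTab board (L0 : Int)) y x = η := by
    rw [← hxx, ← hyy]; exact dnTab_getD board L0 x.toNat y.toNat (by omega)
  have hblock : ¬(0 ≤ x + 1 * (η - x + 1) ∧ x + 1 * (η - x + 1) < (board.length : Int) ∧
      0 ≤ y + 0 * (η - x + 1) ∧ y + 0 * (η - x + 1) < (L0 : Int)) ∨
      gcell board (x + 1 * (η - x + 1)) (y + 0 * (η - x + 1)) = "D" := by
    have harg1 : x + 1 * (η - x + 1) = η + 1 := by ring
    have harg2 : y + 0 * (η - x + 1) = y := by ring
    rw [harg1, harg2]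
    rcases hsb with h | h
    · exact Or.inl (by omega)
    · refine Or.inr ?_
      have hin : (η + 1).toNat < col.length := by
        by_contra hcon
        rw [List.getD_eq_default _ _ (by omega)] at h
        exact Bool.false_ne_true h
      rw [hcl] at hin
      have hcg := colGet board L0 (η + 1).toNat y.toNat hin (by omega)
      rw [← hcol] at hcg
      rw [hcg] at h
      have : (((η + 1).toNat : Nat) : Int) = η + 1 := by omega
      rw [this, hyy] at h
      exact eq_of_beq h
  have happ := scan_reach board (board.length : Int) (L0 : Int) x y c 1 0
    (max (board.length : Int) (L0 : Int) + 1) (η - x + 1) (by omega) hblock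
    (η - x).toNat 1 (by omega) (by omega) ?_ st
  · rw [happ]
    have h1 : x + 1 * (η - x + 1) - 1 = η := by ring
    have h2 : y + 0 * (η - x + 1) - 0 = y := by ring
    rw [h1, h2, hval]
  · intro t ht1 ht2
    have harg1 : x + 1 * t = x + t := by ring
    have harg2 : y + 0 * t = y := by ring
    rw [harg1, harg2]
    refine ⟨⟨by omega, by omega, by omega, by omega⟩, ?_⟩
    have hj : (((x + t).toNat : Nat) : Int) = x + t := by omega
    have hcg := colGet board L0 (x + t).toNat y.toNat (by omega) (by omega)
    rw [← hcol] at hcg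
    have hfalse := hsmin (x + t).toNat (by omega) (by omega)
    rw [hcg] at hfalse
    rw [← hj, ← hyy]
    intro hEq
    rw [hEq] at hfalse
    simp at hfalse

lemma scan_lf (board : List (List String)) (L0 : Nat) (x y c : Int)
    (hx0 : 0 ≤ x) (hxn : x < (board.length : Int)) (hy0 : 0 ≤ y) (hym : y < (L0 : Int))
    (st : List (List Int) × List (Int × Int × Int)) :
    scanA board (board.length : Int) (L0 : Int) x y c 0 (-1) st
      (PySem.List.pyRange 1 (max (board.length : Int) (L0 : Int) + 1) 1) =
      upd c st x (vget (lfTab board (L0 : Int)) x y) := by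
  have hxx : ((x.toNat : Nat) : Int) = x := Int.toNat_of_nonneg hx0
  have hyy : ((y.toNat : Nat) : Int) = y := Int.toNat_of_nonneg hy0
  have hcl : ((rowsB board (L0 : Int)).getD x.toNat []).length = L0 :=
    rowLine_len board L0 x.toNat (by omega)
  obtain ⟨hs0, hsx, hsb, hsmin⟩ := low_spec _ y.toNat (by rw [hcl]; omega)
  set row := (rowsB board (L0 : Int)).getD x.toNat [] with hrow
  set σ := (stopsLow row).getD y.toNat 0 with hσ
  rw [hyy] at hsx
  have hval : vget (lfTab board (L0 : Int)) x y = σ := by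
    rw [← hxx, ← hyy]; exact lfTab_getD board L0 x.toNat y.toNat (by omega)
  have hblock : ¬(0 ≤ x + 0 * (y - σ + 1) ∧ x + 0 * (y - σ + 1) < (board.length : Int) ∧
      0 ≤ y + (-1) * (y - σ + 1) ∧ y + (-1) * (y - σ + 1) < (L0 : Int)) ∨
      gcell board (x + 0 * (y - σ + 1)) (y + (-1) * (y - σ + 1)) = "D" := by
    have harg1 : x + 0 * (y - σ + 1) = x := by ring
    have harg2 : y + (-1) * (y - σ + 1) = σ - 1 := by ring
    rw [harg1, harg2]
    by_cases hσ0 : σ = 0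
    · exact Or.inl (by omega)
    · refine Or.inr ?_
      have hcg := rowGet board L0 x.toNat (σ - 1).toNat (by omega) (by omega)
      rcases hsb with h | h
      · exact absurd h hσ0
      · rw [← hrow] at hcg
        rw [hcg] at h
        have : (((σ - 1).toNat : Nat) : Int) = σ - 1 := by omega
        rw [this, hxx] at h
        exact eq_of_beq h
  have happ := scan_reach board (board.length : Int) (L0 : Int) x y c 0 (-1)
    (max (board.length : Int) (L0 : Int) + 1) (y - σ + 1) (by omega) hblock
    (y - σ).toNat 1 (by omega) (by omega) ?_ st
  · rw [happ]
    have h1 : x + 0 * (y - σ + 1) - 0 = x := by ring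
    have h2 : y + (-1) * (y - σ + 1) - (-1) = σ := by ring
    rw [h1, h2, hval]
  · intro t ht1 ht2
    have harg1 : x + 0 * t = x := by ring
    have harg2 : y + (-1) * t = y - t := by ring
    rw [harg1, harg2]
    refine ⟨⟨by omega, by omega, by omega, by omega⟩, ?_⟩
    have hj : (((y - t).toNat : Nat) : Int) = y - t := by omega
    have hcg := rowGet board L0 x.toNat (y - t).toNat (by omega) (by omega)
    rw [← hrow] at hcg
    have hfalse := hsmin (y - t).toNat (by omega) (by omega)
    rw [hcg] at hfalse
    rw [← hj, ← hxx]
    intro hEq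
    rw [hEq] at hfalse
    simp at hfalse

lemma scan_rt (board : List (List String)) (L0 : Nat) (x y c : Int)
    (hx0 : 0 ≤ x) (hxn : x < (board.length : Int)) (hy0 : 0 ≤ y) (hym : y < (L0 : Int))
    (st : List (List Int) × List (Int × Int × Int)) :
    scanA board (board.length : Int) (L0 : Int) x y c 0 1 st
      (PySem.List.pyRange 1 (max (board.length : Int) (L0 : Int) + 1) 1) =
      upd c st x (vget (rtTab board (L0 : Int)) x y) := by
  have hxx : ((x.toNat : Nat) : Int) = x := Int.toNat_of_nonneg hx0
  have hyy : ((y.toNat : Nat) : Int) = y := Int.toNat_of_nonneg hy0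
  have hcl : ((rowsB board (L0 : Int)).getD x.toNat []).length = L0 :=
    rowLine_len board L0 x.toNat (by omega)
  obtain ⟨hs1, hs2, hsb, hsmin⟩ := high_spec _ y.toNat (by rw [hcl]; omega)
  set row := (rowsB board (L0 : Int)).getD x.toNat [] with hrow
  set ρ := (stopsHigh row).getD y.toNat 0 with hρ
  rw [hyy] at hs1
  rw [hcl] at hs2 hsb
  have hval : vget (rtTab board (L0 : Int)) x y = ρ := by
    rw [← hxx, ← hyy]; exact rtTab_getD board L0 x.toNat y.toNat (by omega)
  have hblock : ¬(0 ≤ x + 0 * (ρ - y + 1) ∧ x + 0 * (ρ - y + 1) < (board.length : Int) ∧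
      0 ≤ y + 1 * (ρ - y + 1) ∧ y + 1 * (ρ - y + 1) < (L0 : Int)) ∨
      gcell board (x + 0 * (ρ - y + 1)) (y + 1 * (ρ - y + 1)) = "D" := by
    have harg1 : x + 0 * (ρ - y + 1) = x := by ring
    have harg2 : y + 1 * (ρ - y + 1) = ρ + 1 := by ring
    rw [harg1, harg2]
    rcases hsb with h | h
    · exact Or.inl (by omega)
    · refine Or.inr ?_
      have hin : (ρ + 1).toNat < row.length := by
        by_contra hcon
        rw [List.getD_eq_default _ _ (by omega)] at h
        exact Bool.false_ne_true h
      rw [hcl] at hin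
      have hcg := rowGet board L0 x.toNat (ρ + 1).toNat (by omega) hin
      rw [← hrow] at hcg
      rw [hcg] at h
      have : (((ρ + 1).toNat : Nat) : Int) = ρ + 1 := by omega
      rw [this, hxx] at h
      exact eq_of_beq h
  have happ := scan_reach board (board.length : Int) (L0 : Int) x y c 0 1
    (max (board.length : Int) (L0 : Int) + 1) (ρ - y + 1) (by omega) hblock
    (ρ - y).toNat 1 (by omega) (by omega) ?_ st
  · rw [happ]
    have h1 : x + 0 * (ρ - y + 1) - 0 = x := by ring
    have h2 : y + 1 * (ρ - y + 1) - 1 = ρ := by ring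
    rw [h1, h2, hval]
  · intro t ht1 ht2
    have harg1 : x + 0 * t = x := by ring
    have harg2 : y + 1 * t = y + t := by ring
    rw [harg1, harg2]
    refine ⟨⟨by omega, by omega, by omega, by omega⟩, ?_⟩
    have hj : (((y + t).toNat : Nat) : Int) = y + t := by omega
    have hcg := rowGet board L0 x.toNat (y + t).toNat (by omega) (by omega)
    rw [← hrow] at hcg
    have hfalse := hsmin (y + t).toNat (by omega) (by omega)
    rw [hcg] at hfalse
    rw [← hj, ← hxx]
    intro hEq
    rw [hEq] at hfalse
    simp at hfalse

lemma up_bounds (board : List (List String)) (L0 : Nat) (x y : Int)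
    (hx0 : 0 ≤ x) (hxn : x < (board.length : Int)) (hy0 : 0 ≤ y) (hym : y < (L0 : Int)) :
    0 ≤ vget (upTab board (L0 : Int)) y x ∧ vget (upTab board (L0 : Int)) y x ≤ x := by
  have hxx : ((x.toNat : Nat) : Int) = x := Int.toNat_of_nonneg hx0
  have hyy : ((y.toNat : Nat) : Int) = y := Int.toNat_of_nonneg hy0
  have hcl := colLine_len board L0 y.toNat (by omega)
  obtain ⟨hs0, hsx, _, _⟩ := low_spec _ x.toNat (by rw [hcl]; omega)
  rw [← hxx, ← hyy, upTab_getD board L0 x.toNat y.toNat (by omega)]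
  omega

lemma dn_bounds (board : List (List String)) (L0 : Nat) (x y : Int)
    (hx0 : 0 ≤ x) (hxn : x < (board.length : Int)) (hy0 : 0 ≤ y) (hym : y < (L0 : Int)) :
    x ≤ vget (dnTab board (L0 : Int)) y x ∧
      vget (dnTab board (L0 : Int)) y x < (board.length : Int) := by
  have hxx : ((x.toNat : Nat) : Int) = x := Int.toNat_of_nonneg hx0
  have hyy : ((y.toNat : Nat) : Int) = y := Int.toNat_of_nonneg hy0
  have hcl := colLine_len board L0 y.toNat (by omega)
  obtain ⟨hs1, hs2, _, _⟩ := high_spec _ x.toNat (by rw [hcl]; omega)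
  rw [hcl] at hs2
  rw [← hxx, ← hyy, dnTab_getD board L0 x.toNat y.toNat (by omega)]
  omega

lemma lf_bounds (board : List (List String)) (L0 : Nat) (x y : Int)
    (hx0 : 0 ≤ x) (hxn : x < (board.length : Int)) (hy0 : 0 ≤ y) (hym : y < (L0 : Int)) :
    0 ≤ vget (lfTab board (L0 : Int)) x y ∧ vget (lfTab board (L0 : Int)) x y ≤ y := by
  have hxx : ((x.toNat : Nat) : Int) = x := Int.toNat_of_nonneg hx0
  have hyy : ((y.toNat : Nat) : Int) = y := Int.toNat_of_nonneg hy0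
  have hcl := rowLine_len board L0 x.toNat (by omega)
  obtain ⟨hs0, hsy, _, _⟩ := low_spec _ y.toNat (by rw [hcl]; omega)
  rw [← hxx, ← hyy, lfTab_getD board L0 x.toNat y.toNat (by omega)]
  omega

lemma rt_bounds (board : List (List String)) (L0 : Nat) (x y : Int)
    (hx0 : 0 ≤ x) (hxn : x < (board.length : Int)) (hy0 : 0 ≤ y) (hym : y < (L0 : Int)) :
    y ≤ vget (rtTab board (L0 : Int)) x y ∧ vget (rtTab board (L0 : Int)) x y < (L0 : Int) := by
  have hxx : ((x.toNat : Nat) : Int) = x := Int.toNat_of_nonneg hx0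
  have hyy : ((y.toNat : Nat) : Int) = y := Int.toNat_of_nonneg hy0
  have hcl := rowLine_len board L0 x.toNat (by omega)
  obtain ⟨hs1, hs2, _, _⟩ := high_spec _ y.toNat (by rw [hcl]; omega)
  rw [hcl] at hs2
  rw [← hxx, ← hyy, rtTab_getD board L0 x.toNat y.toNat (by omega)]
  omega

lemma step_eq (board : List (List String)) (L0 : Nat) (x y c : Int)
    (hx0 : 0 ≤ x) (hxn : x < (board.length : Int)) (hy0 : 0 ≤ y) (hym : y < (L0 : Int))
    (st : List (List Int) × List (Int × Int × Int)) :
    stepA board (board.length : Int) (L0 : Int) x y c st =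
      stepB x y c (vget (upTab board (L0 : Int)) y x) (vget (dnTab board (L0 : Int)) y x)
        (vget (lfTab board (L0 : Int)) x y) (vget (rtTab board (L0 : Int)) x y) st := by
  simp only [stepA, List.foldl]
  rw [stepB_eq_upd,
    scan_up board L0 x y c hx0 hxn hy0 hym st,
    scan_dn board L0 x y c hx0 hxn hy0 hym _,
    scan_lf board L0 x y c hx0 hxn hy0 hym _,
    scan_rt board L0 x y c hx0 hxn hy0 hym _]

lemma mem_upd (c : Int) (st : List (List Int) × List (Int × Int × Int)) (i j : Int)
    (p : Int × Int × Int) (hp : p ∈ (upd c st i j).2) : p ∈ st.2 ∨ p = (i, j, c + 1) := by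
  unfold upd at hp
  split_ifs at hp
  · rcases List.mem_append.mp hp with h | h
    · exact Or.inl h
    · exact Or.inr (by simpa using h)
  · exact Or.inl hp

lemma loop_eq (board : List (List String)) (L0 : Nat) :
    ∀ (fuel : Nat) (q : List (Int × Int × Int)) (v : List (List Int)),
    (∀ p ∈ q, 0 ≤ p.1 ∧ p.1 < (board.length : Int) ∧ 0 ≤ p.2.1 ∧ p.2.1 < (L0 : Int)) →
    loopA board (board.length : Int) (L0 : Int) fuel q v =
      loopB board (upTab board (L0 : Int)) (dnTab board (L0 : Int))
        (lfTab board (L0 : Int)) (rtTab board (L0 : Int)) fuel q v := by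
  intro fuel
  induction fuel with
  | zero => intro q v _; rfl
  | succ f ih =>
      intro q v hq
      cases q with
      | nil => rfl
      | cons p qr =>
          obtain ⟨x, y, c⟩ := p
          obtain ⟨hx0, hxn, hy0, hym⟩ := hq _ List.mem_cons_self
          simp only [] at hx0 hxn hy0 hym
          simp only [loopA, loopB]
          by_cases hg : gcell board x y = "G"
          · rw [if_pos hg, if_pos hg]
          · rw [if_neg hg, if_neg hg, step_eq board L0 x y c hx0 hxn hy0 hym]
            apply ih
            intro p hp
            rw [stepB_eq_upd] at hp
            rcases mem_upd _ _ _ _ _ hp with hp | hp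
            · rcases mem_upd _ _ _ _ _ hp with hp | hp
              · rcases mem_upd _ _ _ _ _ hp with hp | hp
                · rcases mem_upd _ _ _ _ _ hp with hp | hp
                  · exact hq p (List.mem_cons_of_mem _ hp)
                  · subst hp
                    have := up_bounds board L0 x y hx0 hxn hy0 hym
                    exact ⟨by omega, by omega, hy0, hym⟩
                · subst hp
                  have := dn_bounds board L0 x y hx0 hxn hy0 hym
                  exact ⟨by omega, by omega, hy0, hym⟩
              · subst hp
                have := lf_bounds board L0 x y hx0 hxn hy0 hym
                exact ⟨hx0, hxn, by simp only []; omega, by simp only []; omega⟩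
            · subst hp
              have := rt_bounds board L0 x y hx0 hxn hy0 hym
              exact ⟨hx0, hxn, by simp only []; omega, by simp only []; omega⟩

lemma seed_inner (board : List (List String)) (n m i : Int) (h0 : 0 ≤ i) (h1 : i < n) :
    ∀ (l : List Int) (st : List (Int × Int × Int) × List (List Int)),
    (∀ j ∈ l, 0 ≤ j ∧ j < m) →
    (∀ p ∈ st.1, 0 ≤ p.1 ∧ p.1 < n ∧ 0 ≤ p.2.1 ∧ p.2.1 < m) →
    ∀ p ∈ (l.foldl (fun st j =>
        if gcell board i j = "R" then (st.1 ++ [(i, j, (0 : Int))], vset st.2 i j 0) else st)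
        st).1, 0 ≤ p.1 ∧ p.1 < n ∧ 0 ≤ p.2.1 ∧ p.2.1 < m := by
  intro l
  induction l with
  | nil => intro st _ hst; exact hst
  | cons j l' ihl =>
      intro st hl hst
      simp only [List.foldl_cons]
      apply ihl
      · intro j' hj'; exact hl j' (List.mem_cons_of_mem _ hj')
      · split_ifs with hr
        · intro p hp
          rcases List.mem_append.mp hp with h | h
          · exact hst p h
          · have hj := hl j List.mem_cons_self
            have : p = (i, j, (0 : Int)) := by simpa using h
            subst this
            exact ⟨h0, h1, hj.1, hj.2⟩
        · exact hst

lemma seed_mem (board : List (List String)) (n m : Int) :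
    ∀ p ∈ (seed board n m).1, 0 ≤ p.1 ∧ p.1 < n ∧ 0 ≤ p.2.1 ∧ p.2.1 < m := by
  unfold seed
  have houter : ∀ (l : List Int) (st : List (Int × Int × Int) × List (List Int)),
      (∀ i ∈ l, 0 ≤ i ∧ i < n) →
      (∀ p ∈ st.1, 0 ≤ p.1 ∧ p.1 < n ∧ 0 ≤ p.2.1 ∧ p.2.1 < m) →
      ∀ p ∈ (l.foldl (fun st i => (PySem.List.pyRange 0 m 1).foldl (fun st j =>
          if gcell board i j = "R" then (st.1 ++ [(i, j, (0 : Int))], vset st.2 i j 0) else st) st)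
          st).1, 0 ≤ p.1 ∧ p.1 < n ∧ 0 ≤ p.2.1 ∧ p.2.1 < m := by
    intro l
    induction l with
    | nil => intro st _ hst; exact hst
    | cons i l' ihl =>
        intro st hl hst
        simp only [List.foldl_cons]
        apply ihl
        · intro i' hi'; exact hl i' (List.mem_cons_of_mem _ hi')
        · have hi := hl i List.mem_cons_self
          apply seed_inner board n m i hi.1 hi.2
          · intro j hj
            exact (PySem.List.mem_pyRange_one.mp hj).imp id (fun h => h)
          · exact hst
  apply houter
  · intro i hi
    exact (PySem.List.mem_pyRange_one.mp hi).imp id (fun h => h)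
  · intro p hp; simp at hp

-- ===== VERDICT (by name: the statement is the Claim_ definition above) =====
theorem solution_spec : Claim_equal_solution := by
  unfold Claim_equal_solution
  intro board _ _
  unfold Spec_solution solution solution_alt
  exact loop_eq board (board.headD []).length _ _ _ (seed_mem board _ _)
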